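-- pv_equiv track=rewrite | github.com/Ragnarok-z/OTN_over_EON | MultilayerEON.py | find_contiguous_blocks
-- ===== SOURCE A (Python) =====
-- from typing import List, Set
--
-- def find_contiguous_blocks(available_fs: Set[int], required_size: int) -> List[List[int]]:
--     """Find all contiguous blocks of required_size in available_fs"""
--     if not available_fs:
--         return []
--
--     sorted_fs = sorted(available_fs)
--     blocks = []
--     current_block = [sorted_fs[0]]
--
--     for fs in sorted_fs[1:]:
--         if fs == current_block[-1] + 1:
--             current_block.append(fs)
--         else:
--             if len(current_block) >= required_size:
--                 blocks.append(current_block)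
--             current_block = [fs]
--
--     if len(current_block) >= required_size:
--         blocks.append(current_block)
--
--     return blocks
-- ===== SOURCE B (Python) =====
-- def find_contiguous_blocks(available_fs, required_size):
--     """Bucket every value of the sorted set under the key v - i, which is
--     constant exactly along a run of consecutive integers, then keep the
--     buckets that reach required_size (dict preserves run order)."""
--     runs = {}
--     for i, v in enumerate(sorted(available_fs)):
--         k = v - i
--         runs[k] = runs.get(k, []) + [v]
--     return [run for run in runs.values() if len(run) >= required_size]
-- ===== Notes on version B (the rewrite author's own statement) =====
-- stated objective: alternative
-- what changed: Instead of A's stateful boundary scan (grow a current block, flush it on each gap), B buckets every sorted value into a dict keyed by the arithmetic invariant v - i (constant exactly along a run of consecutive integers) and then filters the dict's buckets by size; no adjacency comparison or current-block state exists.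
import Mathlib
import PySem

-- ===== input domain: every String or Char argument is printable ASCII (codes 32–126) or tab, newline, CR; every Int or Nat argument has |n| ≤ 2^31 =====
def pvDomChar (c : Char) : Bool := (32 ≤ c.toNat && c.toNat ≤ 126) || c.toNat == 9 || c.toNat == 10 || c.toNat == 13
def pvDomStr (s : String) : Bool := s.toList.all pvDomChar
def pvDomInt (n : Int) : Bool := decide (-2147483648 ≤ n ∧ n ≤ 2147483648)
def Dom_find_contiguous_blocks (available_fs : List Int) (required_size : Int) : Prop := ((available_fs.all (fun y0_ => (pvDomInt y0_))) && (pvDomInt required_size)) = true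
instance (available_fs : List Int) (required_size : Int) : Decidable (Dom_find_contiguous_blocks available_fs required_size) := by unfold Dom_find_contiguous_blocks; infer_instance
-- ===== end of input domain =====

-- B replaces A's stateful boundary scan by a dict bucketing each sorted value under the
-- run-invariant key v - i, then filters the buckets by size; objective: alternative (same cost).

-- ===== PORT A =====
-- A's loop body on the state (blocks, current_block); current_block[-1] is pyGetD _ (-1) _
def pvStepA (required_size : Int) (st : List (List Int) × List Int) (fs : Int) : List (List Int) × List Int :=
  if fs = PySem.List.pyGetD st.2 (-1) 0 + 1 then (st.1, st.2 ++ [fs])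
  else if (st.2.length : Int) ≥ required_size then (st.1 ++ [st.2], [fs]) else (st.1, [fs])

def find_contiguous_blocks (available_fs : List Int) (required_size : Int) : List (List Int) :=
  if available_fs = [] then []
  else
    let sorted_fs := PySem.List.sorted available_fs (fun x => x) false
    let st := (PySem.List.slice sorted_fs (some 1) none).foldl (pvStepA required_size)
      ([], [PySem.List.pyGetD sorted_fs 0 0])
    if (st.2.length : Int) ≥ required_size then st.1 ++ [st.2] else st.1

-- ===== PORT B =====
-- B's loop body: runs[k] = runs.get(k, []) + [v] with k = v - i
def pvStepD (d : PySem.Dict Int (List Int)) (iv : Int × Int) : PySem.Dict Int (List Int) :=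
  d.insert (iv.2 - iv.1) (d.getD (iv.2 - iv.1) [] ++ [iv.2])

def find_contiguous_blocks_alt (available_fs : List Int) (required_size : Int) : List (List Int) :=
  let runs := (PySem.List.enumerate (PySem.List.sorted available_fs (fun x => x) false) 0).foldl
    pvStepD PySem.Dict.empty
  runs.values.filter (fun run => decide ((run.length : Int) ≥ required_size))

-- ===== PRECONDITION & SPEC =====
-- Pre_ excludes lists with duplicate values: available_fs is typed Set[int] in A, a list with
-- duplicates represents no set, and the way each program splits runs at a duplicate there is an
-- accident of its bookkeeping (A breaks the block, B's key arithmetic may merge distant values).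
def Pre_find_contiguous_blocks (available_fs : List Int) (required_size : Int) : Prop :=
  available_fs.Nodup
instance (available_fs : List Int) (required_size : Int) : Decidable (Pre_find_contiguous_blocks available_fs required_size) := by unfold Pre_find_contiguous_blocks; infer_instance

def pvWitness_find_contiguous_blocks : List Int × Int := ([4, 1, 2, 7], 2)

def Spec_find_contiguous_blocks (available_fs : List Int) (required_size : Int) (out : List (List Int)) : Prop := out = find_contiguous_blocks_alt available_fs required_size
instance (available_fs : List Int) (required_size : Int) (out : List (List Int)) : Decidable (Spec_find_contiguous_blocks available_fs required_size out) := by unfold Spec_find_contiguous_blocks; infer_instance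

-- ===== CLAIM (what is proved, stated in full; the proofs are below) =====
def Claim_equal_find_contiguous_blocks : Prop := ∀ (available_fs : List Int) (required_size : Int), Dom_find_contiguous_blocks available_fs required_size → Pre_find_contiguous_blocks available_fs required_size → Spec_find_contiguous_blocks available_fs required_size (find_contiguous_blocks available_fs required_size)

-- ===== LEMMAS AND PROOFS =====

-- the maximal consecutive runs of a list, by structural recursion: the common spec both ports are reduced to
def pvChunks : List Int → List (List Int)
  | [] => []
  | v :: rest =>
    match pvChunks rest with
    | (w :: ws) :: gs => if w = v + 1 then (v :: w :: ws) :: gs else [v] :: (w :: ws) :: gs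
    | gs => [v] :: gs

-- prepend a pending (nonempty) block to a chunk list, merging with the head run when consecutive
def pvAttach (cur : List Int) : List (List Int) → List (List Int)
  | (w :: ws) :: gs => if w = cur.getLast?.getD 0 + 1 then (cur ++ w :: ws) :: gs else cur :: (w :: ws) :: gs
  | gs => cur :: gs

-- the size predicate applied to each finished block
def pvP (required_size : Int) (r : List Int) : Bool := decide ((r.length : Int) ≥ required_size)

lemma pvAttach_nil (cur : List Int) : pvAttach cur [] = [cur] := rfl
lemma pvAttach_nil_head (cur : List Int) (gs : List (List Int)) : pvAttach cur ([] :: gs) = cur :: [] :: gs := rfl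
lemma pvAttach_cons (cur : List Int) (w : Int) (ws : List Int) (gs : List (List Int)) :
    pvAttach cur ((w :: ws) :: gs) =
      if w = cur.getLast?.getD 0 + 1 then (cur ++ w :: ws) :: gs else cur :: (w :: ws) :: gs := rfl

lemma pvChunks_cons (v : Int) (rest : List Int) :
    pvChunks (v :: rest) = pvAttach [v] (pvChunks rest) := by
  simp only [pvChunks]
  rcases pvChunks rest with _ | ⟨_ | ⟨w, ws⟩, gs⟩ <;> simp [pvAttach_nil, pvAttach_nil_head, pvAttach_cons]

lemma pvAttach_snoc (cur : List Int) (fs : Int) (gs : List (List Int)) (h : fs = cur.getLast?.getD 0 + 1) :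
    pvAttach cur (pvAttach [fs] gs) = pvAttach (cur ++ [fs]) gs := by
  have hfs : ([fs] : List Int).getLast?.getD 0 = fs := rfl
  have hlast : (cur ++ [fs]).getLast?.getD 0 = fs := by simp
  rcases gs with _ | ⟨_ | ⟨w, ws⟩, t⟩
  · rw [pvAttach_nil, pvAttach_nil, pvAttach_cons, if_pos h]
  · rw [pvAttach_nil_head, pvAttach_cons, if_pos h, pvAttach_nil_head]
  · by_cases hw : w = fs + 1
    · rw [pvAttach_cons [fs] w ws t, hfs, if_pos hw, List.singleton_append,
        pvAttach_cons, if_pos h, pvAttach_cons, hlast, if_pos hw]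
      simp
    · rw [pvAttach_cons [fs] w ws t, hfs, if_neg hw,
        pvAttach_cons cur fs [] ((w :: ws) :: t), if_pos h,
        pvAttach_cons, hlast, if_neg hw]

lemma pvAttach_head_no (cur : List Int) (fs : Int) (gs : List (List Int)) (h : ¬ fs = cur.getLast?.getD 0 + 1) :
    pvAttach cur (pvAttach [fs] gs) = cur :: pvAttach [fs] gs := by
  have hfs : ([fs] : List Int).getLast?.getD 0 = fs := rfl
  rcases gs with _ | ⟨_ | ⟨w, ws⟩, t⟩
  · rw [pvAttach_nil, pvAttach_cons, if_neg h]
  · rw [pvAttach_nil_head, pvAttach_cons, if_neg h]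
  · by_cases hw : w = fs + 1
    · rw [pvAttach_cons [fs] w ws t, hfs, if_pos hw, List.singleton_append,
        pvAttach_cons, if_neg h]
    · rw [pvAttach_cons [fs] w ws t, hfs, if_neg hw,
        pvAttach_cons cur fs [] ((w :: ws) :: t), if_neg h]

lemma pvPyGetD_neg_one_getLast {α : Type} (xs : List α) (d : α) (hx : xs ≠ []) :
    PySem.List.pyGetD xs (-1) d = xs.getLast?.getD d := by
  have hlen : xs.length - 1 < xs.length := by
    have := List.length_pos_iff.mpr hx; omega
  rw [PySem.List.pyGetD_neg_ofNat xs 1 d (by omega) (by omega)]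
  simp [List.getLast?_eq_getElem?, List.getElem?_eq_getElem hlen]

lemma pvFoldA (required_size : Int) :
    ∀ (rest : List Int) (blocks : List (List Int)) (c : Int) (cs : List Int),
    (let st := rest.foldl (pvStepA required_size) (blocks, c :: cs)
     if (st.2.length : Int) ≥ required_size then st.1 ++ [st.2] else st.1) =
    blocks ++ (pvAttach (c :: cs) (pvChunks rest)).filter (pvP required_size) := by
  intro rest
  induction rest with
  | nil =>
    intro blocks c cs
    simp only [List.foldl_nil, pvChunks, pvAttach_nil, List.filter_cons]
    by_cases hp : ((c :: cs).length : Int) ≥ required_size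
    · rw [if_pos hp, show pvP required_size (c :: cs) = true by simpa [pvP] using hp]
      simp
    · rw [if_neg hp, show pvP required_size (c :: cs) = false by simpa [pvP] using hp]
      simp
  | cons fs rest' ih =>
    intro blocks c cs
    have hlast : PySem.List.pyGetD (c :: cs) (-1) 0 = (c :: cs).getLast?.getD 0 :=
      pvPyGetD_neg_one_getLast _ _ (by simp)
    by_cases hfs : fs = (c :: cs).getLast?.getD 0 + 1
    · have hstep : pvStepA required_size (blocks, c :: cs) fs = (blocks, (c :: cs) ++ [fs]) := by
        simp [pvStepA, hlast, hfs]
      rw [List.foldl_cons, hstep]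
      have h2 := ih blocks c (cs ++ [fs])
      simp only [List.cons_append] at h2 ⊢
      rw [h2, pvChunks_cons, pvAttach_snoc _ _ _ hfs]
      simp
    · have hstep : pvStepA required_size (blocks, c :: cs) fs =
          (if ((c :: cs).length : Int) ≥ required_size then blocks ++ [c :: cs] else blocks, [fs]) := by
        simp only [pvStepA, hlast]
        rw [if_neg hfs]
        split <;> simp_all
      rw [List.foldl_cons, hstep]
      by_cases hp : ((c :: cs).length : Int) ≥ required_size
      · rw [if_pos hp, ih, pvChunks_cons, pvAttach_head_no _ _ _ hfs, List.filter_cons,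
          show pvP required_size (c :: cs) = true by simpa [pvP] using hp]
        simp
      · rw [if_neg hp, ih, pvChunks_cons, pvAttach_head_no _ _ _ hfs, List.filter_cons,
          show pvP required_size (c :: cs) = false by simpa [pvP] using hp]
        simp

lemma pvPortA_eq (available_fs : List Int) (required_size : Int) :
    find_contiguous_blocks available_fs required_size =
    (pvChunks (PySem.List.sorted available_fs (fun x => x) false)).filter (pvP required_size) := by
  by_cases h : available_fs = []
  · subst h; simp [find_contiguous_blocks, PySem.List.sorted, pvChunks]
  · have hs : PySem.List.sorted available_fs (fun x => x) false ≠ [] := by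
      simpa [PySem.List.sorted_eq_nil_iff] using h
    obtain ⟨hd, tl, hst⟩ := List.exists_cons_of_ne_nil hs
    simp only [find_contiguous_blocks, if_neg h, hst]
    have h1 : PySem.List.slice (hd :: tl) (some 1) none = tl := by
      rw [show (1 : Int) = ((1 : Nat) : Int) by norm_num, PySem.List.slice_from_natCast]
      simp
    have h0 : PySem.List.pyGetD (hd :: tl) 0 0 = hd := by
      simp [PySem.List.pyGetD_zero_cons]
    rw [h1, h0]
    have h2 := pvFoldA required_size tl [] hd []
    simp only [List.nil_append] at h2
    rw [h2, ← pvChunks_cons]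

-- B side: folding pvStepD over an enumerated strictly increasing tail, from a dict whose
-- items are pre ++ [(k, run)] with strictly increasing keys and run ending at k + (n - 1),
-- appends exactly the remaining chunks (merging the first one into run when consecutive).
lemma pvFoldD (s : List Int) : ∀ (n : Int) (pre : List (Int × List Int)) (k : Int) (run : List Int),
    run.getLast?.getD 0 = k + (n - 1) →
    ((pre ++ [(k, run)]).map Prod.fst).Pairwise (· < ·) →
    ((k + (n - 1)) :: s).Pairwise (· < ·) →
    ((PySem.List.enumerate s n).foldl pvStepD (PySem.Dict.mk (pre ++ [(k, run)]))).values
      = pre.map Prod.snd ++ pvAttach run (pvChunks s) := by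
  induction s with
  | nil =>
    intro n pre k run _ _ _
    simp [PySem.List.enumerate_nil, pvChunks, pvAttach_nil, PySem.Dict.values]
  | cons v rest ih =>
    intro n pre k run hlast hpw hch
    have hknod : ((pre ++ [(k, run)]).map Prod.fst).Nodup := hpw.imp ne_of_lt
    have hprelt : ∀ p ∈ pre, p.1 < k := by
      intro p hp
      have := (List.pairwise_append.mp (by simpa using hpw)).2.2 p.1 (by simp; exact ⟨p.2, hp⟩) k (by simp)
      simpa using this
    rw [List.pairwise_cons] at hch
    obtain ⟨hltall, hch'⟩ := hch
    have hlt : k + (n - 1) < v := hltall v (by simp)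
    rw [PySem.List.enumerate_cons, List.foldl_cons]
    by_cases hv : v = k + n
    · -- same key k: overwrite the last entry in place
      have hkey : v - n = k := by omega
      have hget : (PySem.Dict.mk (pre ++ [(k, run)])).getD (v - n) [] = run := by
        rw [hkey]
        exact PySem.Dict.getD_of_mem_items _ (by simp) (by simpa [PySem.Dict.keys] using hknod) []
      have hcont : (PySem.Dict.mk (pre ++ [(k, run)])).contains (v - n) = true := by
        rw [hkey, PySem.Dict.contains_eq_decide_mem_keys]
        simp [PySem.Dict.keys]
      have hstate : pvStepD (PySem.Dict.mk (pre ++ [(k, run)])) (n, v)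
          = PySem.Dict.mk (pre ++ [(k, run ++ [v])]) := by
        apply PySem.Dict.ext
        rw [pvStepD]
        simp only [hget]
        rw [PySem.Dict.items_insert_of_contains _ _ hcont, hkey]
        simp only [List.map_append]
        congr 1
        · conv_rhs => rw [← List.map_id pre]
          apply List.map_congr_left
          intro p hp
          have : p.1 ≠ k := ne_of_lt (hprelt p hp)
          simp [this]
        · simp
      rw [hstate, ih (n + 1) pre k (run ++ [v]) (by simp; omega)
            (by simpa using hpw) (by rw [show k + (n + 1 - 1) = v by omega]; exact hch')]
      rw [pvChunks_cons, pvAttach_snoc run v _ (by omega)]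
    · -- new key v - n > k: append a fresh singleton bucket
      have hkgt : k < v - n := by omega
      have hallt : ∀ x ∈ (pre ++ [(k, run)]).map Prod.fst, x < v - n := by
        intro x hx
        simp only [List.map_append, List.mem_append] at hx
        rcases hx with hx | hx
        · obtain ⟨p, hp, rfl⟩ := List.mem_map.mp hx
          exact lt_trans (hprelt p hp) hkgt
        · simp at hx; omega
      have hcont : (PySem.Dict.mk (pre ++ [(k, run)])).contains (v - n) = false := by
        rw [PySem.Dict.contains_eq_decide_mem_keys]
        simp only [PySem.Dict.keys, decide_eq_false_iff_not]
        intro hmem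
        exact absurd rfl (ne_of_lt (hallt _ (by simpa [PySem.Dict.items] using hmem)))
      have hget : (PySem.Dict.mk (pre ++ [(k, run)])).getD (v - n) [] = [] :=
        PySem.Dict.getD_of_not_contains _ [] hcont
      have hstate : pvStepD (PySem.Dict.mk (pre ++ [(k, run)])) (n, v)
          = PySem.Dict.mk ((pre ++ [(k, run)]) ++ [(v - n, [v])]) := by
        apply PySem.Dict.ext
        rw [pvStepD]
        simp only [hget]
        rw [PySem.Dict.items_insert_of_not_contains _ _ hcont]
        simp
      rw [hstate, ih (n + 1) (pre ++ [(k, run)]) (v - n) [v] (by simp)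
            (by
              rw [List.map_append, List.pairwise_append]
              refine ⟨hpw, by simp, ?_⟩
              intro x hx y hy
              simp at hy; subst hy
              exact hallt x hx)
            (by rw [show v - n + (n + 1 - 1) = v by omega]; exact hch')]
      rw [List.map_append, pvChunks_cons,
        pvAttach_head_no run v _ (by rw [hlast]; omega)]
      simp

lemma pvPortB_eq (available_fs : List Int) (required_size : Int)
    (hnd : available_fs.Nodup) :
    find_contiguous_blocks_alt available_fs required_size =
    (pvChunks (PySem.List.sorted available_fs (fun x => x) false)).filter (pvP required_size) := by
  have hperm := PySem.List.sorted_perm available_fs (fun x => x) false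
  have hnds : (PySem.List.sorted available_fs (fun x => x) false).Nodup := hperm.nodup_iff.mpr hnd
  have hle := PySem.List.sorted_pairwise available_fs (fun x => x)
  have hlt : (PySem.List.sorted available_fs (fun x => x) false).Pairwise (· < ·) :=
    (hle.and hnds).imp (fun h => lt_of_le_of_ne h.1 h.2)
  rcases hs : PySem.List.sorted available_fs (fun x => x) false with _ | ⟨hd, tl⟩
  · simp [find_contiguous_blocks_alt, hs, PySem.List.enumerate_nil, pvChunks, PySem.Dict.values,
      PySem.Dict.empty]
  · rw [hs] at hlt
    have hfirst : pvStepD PySem.Dict.empty (0, hd) = PySem.Dict.mk ([] ++ [(hd, [hd])]) := by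
      apply PySem.Dict.ext
      rw [pvStepD]
      simp only [PySem.Dict.getD_empty]
      rw [PySem.Dict.items_insert_of_not_contains _ _ (PySem.Dict.contains_empty _)]
      simp [PySem.Dict.empty]
    have hfold := pvFoldD tl 1 [] hd [hd] (by simp)
      (by simp) (by simpa [show hd + (1 - 1 : Int) = hd by ring] using hlt)
    simp only [find_contiguous_blocks_alt, hs, PySem.List.enumerate_cons, List.foldl_cons]
    rw [hfirst, show (0 : Int) + 1 = 1 by ring, hfold]
    simp only [List.map_nil, List.nil_append]
    rw [← pvChunks_cons]
    rfl

-- ===== VERDICT (by name: the statement is the Claim_ definition above) =====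
theorem find_contiguous_blocks_spec : Claim_equal_find_contiguous_blocks := by
  intro available_fs required_size _ hpre
  unfold Spec_find_contiguous_blocks
  rw [pvPortA_eq, pvPortB_eq _ _ hpre]
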